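-- pv_equiv track=rewrite | github.com/ThimiH/Competitive_Coding | Competitions/Aces Coders V10/PreCoders/RotatingSensors.py | desemble
-- ===== SOURCE A (Python) =====
-- def desemble(x,y,grid):
--     parts = []
--     for i in range(min(x,y)//2):
--         parts.append([])
--         for j in range(i,y-i-1):
--             parts[i].append(grid[i][j])
--         for j in range(i,x-i-1):
--             parts[i].append(grid[j][-1-i])
--         for j in range(y-i-1,i,-1):
--             parts[i].append(grid[-i-1][j])
--         for j in range(x-i-1,i,-1):
--             parts[i].append(grid[j][i])
--     return parts
-- ===== SOURCE B (Python) =====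
-- def desemble(x, y, grid):
--     parts = []
--     for i in range(min(x, y) // 2):
--         ring = []
--         r, c, dr, dc = i, i, 0, 1
--         for _ in range(2 * (x - 2 * i) + 2 * (y - 2 * i) - 4):
--             ring.append(grid[r][c])
--             nr, nc = r + dr, c + dc
--             if not (i <= nr < x - i and i <= nc < y - i):
--                 dr, dc = dc, -dr
--                 nr, nc = r + dr, c + dc
--             r, c = nr, nc
--         parts.append(ring)
--     return parts
-- ===== Notes on version B (the rewrite author's own statement) =====
-- stated objective: alternative
-- what changed: B replaces A's four per-side inner loops per ring by a single perimeter walk that rotates the direction clockwise (dr,dc)=(dc,-dr) whenever the next cell would leave the ring bounds.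
-- outside the precondition, e.g. on desemble(2, 2, [[1, 2], [3, 4], [5, 6]]): A returns [[1, 2, 6, 3]], B returns [[1, 2, 4, 3]]
import Mathlib
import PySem

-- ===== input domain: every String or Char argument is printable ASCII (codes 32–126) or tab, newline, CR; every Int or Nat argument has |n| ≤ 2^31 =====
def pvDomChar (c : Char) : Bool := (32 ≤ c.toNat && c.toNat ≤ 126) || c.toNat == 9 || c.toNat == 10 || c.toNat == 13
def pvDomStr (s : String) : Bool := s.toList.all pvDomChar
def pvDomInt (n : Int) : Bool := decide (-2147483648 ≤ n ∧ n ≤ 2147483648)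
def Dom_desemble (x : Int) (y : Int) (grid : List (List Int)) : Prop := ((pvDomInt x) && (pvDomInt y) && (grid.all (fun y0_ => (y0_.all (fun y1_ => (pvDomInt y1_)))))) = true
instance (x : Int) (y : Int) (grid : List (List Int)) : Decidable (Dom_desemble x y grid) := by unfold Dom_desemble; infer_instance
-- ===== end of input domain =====

-- B replaces A's four per-side inner loops by one perimeter walk per ring that turns
-- clockwise whenever the next cell would leave the ring (objective: alternative, same cost).

-- grid[r][c] (Python indexing, possibly negative); shared spelling of the cell access both
-- Pythons write as grid[.][.]
def pvCell (grid : List (List Int)) (r c : Int) : Int :=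
  PySem.List.pyGetD (PySem.List.pyGetD grid r []) c 0

-- ===== PORT A =====
-- A appends an empty list `parts.append([])` and then extends `parts[i]`, the list it just
-- appended; the port builds that ring locally with the same four loops and appends it once.
def desemble (x : Int) (y : Int) (grid : List (List Int)) : List (List Int) :=
  (PySem.List.pyRange 0 (PySem.Int.floordiv (min x y) 2) 1).foldl
    (fun parts i =>
      let ring : List Int := []
      let ring := (PySem.List.pyRange i (y - i - 1) 1).foldl
        (fun acc j => acc ++ [pvCell grid i j]) ring
      let ring := (PySem.List.pyRange i (x - i - 1) 1).foldl
        (fun acc j => acc ++ [pvCell grid j (-1 - i)]) ring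
      let ring := (PySem.List.pyRange (y - i - 1) i (-1)).foldl
        (fun acc j => acc ++ [pvCell grid (-i - 1) j]) ring
      let ring := (PySem.List.pyRange (x - i - 1) i (-1)).foldl
        (fun acc j => acc ++ [pvCell grid j i]) ring
      parts ++ [ring]) []

-- ===== PORT B =====
-- the perimeter walk of Source B: fuel = the loop count 2*(x-2i)+2*(y-2i)-4; at each step emit
-- grid[r][c], and if the straight-ahead cell leaves the ring bounds rotate (dr,dc) := (dc,-dr)
def pvWalk (grid : List (List Int)) (x y i : Int) :
    Nat → Int → Int → Int → Int → List Int
  | 0, _, _, _, _ => []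
  | n + 1, r, c, dr, dc =>
    let v := pvCell grid r c
    let nr := r + dr
    let nc := c + dc
    if i ≤ nr ∧ nr < x - i ∧ i ≤ nc ∧ nc < y - i then
      v :: pvWalk grid x y i n nr nc dr dc
    else
      v :: pvWalk grid x y i n (r + dc) (c - dr) dc (-dr)

def desemble_alt (x : Int) (y : Int) (grid : List (List Int)) : List (List Int) :=
  (PySem.List.pyRange 0 (PySem.Int.floordiv (min x y) 2) 1).foldl
    (fun parts i =>
      parts ++ [pvWalk grid x y i (2 * (x - 2 * i) + 2 * (y - 2 * i) - 4).toNat i i 0 1]) []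

-- ===== PRECONDITION & SPEC =====
-- When min(x,y) ≥ 2, Pre_ admits only grids that are exactly x rows of y columns: on ragged or
-- oversized grids A's negative indices grid[-1-i]/grid[j][-1-i] read cells relative to the
-- actual list sizes instead of x,y — an accident of A's implementation that B (which walks the
-- declared x×y ring bounds) does not reproduce; A may also raise IndexError there.
def Pre_desemble (x : Int) (y : Int) (grid : List (List Int)) : Prop :=
  min x y ≤ 1 ∨ ((grid.length : Int) = x ∧ ∀ row ∈ grid, (row.length : Int) = y)
instance (x : Int) (y : Int) (grid : List (List Int)) : Decidable (Pre_desemble x y grid) := by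
  unfold Pre_desemble; infer_instance

def pvWitness_desemble : Int × Int × List (List Int) :=
  (3, 4, [[1, 2, 3, 4], [5, 6, 7, 8], [9, 10, 11, 12]])

def Spec_desemble (x : Int) (y : Int) (grid : List (List Int)) (out : List (List Int)) : Prop := out = desemble_alt x y grid
instance (x : Int) (y : Int) (grid : List (List Int)) (out : List (List Int)) : Decidable (Spec_desemble x y grid out) := by unfold Spec_desemble; infer_instance

-- ===== CLAIM (what is proved, stated in full; the proofs are below) =====
def Claim_equal_desemble : Prop := ∀ (x : Int) (y : Int) (grid : List (List Int)), Dom_desemble x y grid → Pre_desemble x y grid → Spec_desemble x y grid (desemble x y grid)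

-- ===== LEMMAS AND PROOFS =====

-- Python-indexing normalisations -----------------------------------------------------------

-- a negative index reads from the end: shift it by the length
theorem pvGetD_neg_shift {α : Type} (l : List α) (d : α) (t : Int)
    (ht : t < 0) (h2 : 0 ≤ t + l.length) :
    PySem.List.pyGetD l t d = PySem.List.pyGetD l (t + l.length) d := by
  have hidx : l.length - (-t).toNat = (t + (l.length : Int)).toNat := by omega
  simp only [PySem.List.pyGetD, PySem.List.pyGet?, PySem.List.pyIdx?]
  split_ifs <;> try omega
  rw [hidx]

-- under a rectangular grid, pvCell with in-range nonnegative indices never needs the defaults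
theorem pvCell_rect (grid : List (List Int)) (x y r c : Int)
    (hx : (grid.length : Int) = x) (hy : ∀ row ∈ grid, (row.length : Int) = y)
    (hr0 : 0 ≤ r) (hr1 : r < x) :
    (PySem.List.pyGetD grid r []).length = y.toNat ∧
      pvCell grid r c = PySem.List.pyGetD (PySem.List.pyGetD grid r []) c 0 := by
  constructor
  · rw [PySem.List.pyGetD_eq_getElem grid [] hr0 (by omega)]
    have hm : grid[r.toNat] ∈ grid := List.getElem_mem _
    have := hy _ hm
    omega
  · rfl

-- row picked by a negative row index equals the row picked by the wrapped index
theorem pvCell_row_neg (grid : List (List Int)) (x r c : Int)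
    (hx : (grid.length : Int) = x) (hr : r < 0) (h2 : 0 ≤ r + x) :
    pvCell grid r c = pvCell grid (r + x) c := by
  unfold pvCell
  rw [pvGetD_neg_shift grid [] r hr (by omega), hx]

-- col negative index, on a row of a rectangular grid
theorem pvCell_col_neg (grid : List (List Int)) (x y r c : Int)
    (hx : (grid.length : Int) = x) (hy : ∀ row ∈ grid, (row.length : Int) = y)
    (hr0 : 0 ≤ r) (hr1 : r < x) (hc : c < 0) (h2 : 0 ≤ c + y) :
    pvCell grid r c = pvCell grid r (c + y) := by
  unfold pvCell
  obtain ⟨hlen, -⟩ := pvCell_rect grid x y r c hx hy hr0 hr1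
  rw [pvGetD_neg_shift _ 0 c hc (by omega : 0 ≤ c + ((PySem.List.pyGetD grid r []).length : Int)), hlen]
  congr 1
  omega

-- Walk-side segment lemmas ------------------------------------------------------------------

theorem pvWalk_right (grid : List (List Int)) (x y i : Int)
    (h2 : 2 * i + 2 ≤ x) (h3 : 2 * i + 2 ≤ y) :
    ∀ (k rest : Nat) (c : Int), i ≤ c → c + k = y - 1 - i →
      pvWalk grid x y i (k + rest) i c 0 1 =
        (List.range k).map (fun (t : Nat) => pvCell grid i (c + (t : Int))) ++
          pvWalk grid x y i rest i (y - 1 - i) 0 1 := by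
  intro k
  induction k with
  | zero =>
      intro rest c h1 hk
      push_cast at hk
      rw [List.range_zero, List.map_nil, List.nil_append, Nat.zero_add, show c = y - 1 - i by omega]
  | succ k ih =>
      intro rest c h1 hk
      have hstep : pvWalk grid x y i (k + 1 + rest) i c 0 1 =
          pvCell grid i c :: pvWalk grid x y i (k + rest) i (c + 1) 0 1 := by
        rw [show k + 1 + rest = k + rest + 1 by omega]
        show pvWalk grid x y i (k + rest + 1) i c 0 1 = _
        rw [pvWalk]
        rw [if_pos (by push_cast at hk; omega)]
        norm_num
      rw [hstep, ih rest (c + 1) (by omega) (by push_cast at hk ⊢; omega)]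
      rw [List.range_succ_eq_map, List.map_cons, List.map_map]
      simp only [List.cons_append]
      congr 2
      · norm_num
      · apply List.map_congr_left; intro t _; simp [Function.comp]; congr 1; ring

theorem pvWalk_down (grid : List (List Int)) (x y i : Int)
    (h2 : 2 * i + 2 ≤ x) (h3 : 2 * i + 2 ≤ y) :
    ∀ (k rest : Nat) (r : Int), i ≤ r → r + k = x - 1 - i →
      pvWalk grid x y i (k + rest) r (y - 1 - i) 1 0 =
        (List.range k).map (fun (t : Nat) => pvCell grid (r + (t : Int)) (y - 1 - i)) ++
          pvWalk grid x y i rest (x - 1 - i) (y - 1 - i) 1 0 := by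
  intro k
  induction k with
  | zero =>
      intro rest r h1 hk
      push_cast at hk
      rw [List.range_zero, List.map_nil, List.nil_append, Nat.zero_add, show r = x - 1 - i by omega]
  | succ k ih =>
      intro rest r h1 hk
      have hstep : pvWalk grid x y i (k + 1 + rest) r (y - 1 - i) 1 0 =
          pvCell grid r (y - 1 - i) :: pvWalk grid x y i (k + rest) (r + 1) (y - 1 - i) 1 0 := by
        rw [show k + 1 + rest = k + rest + 1 by omega]
        show pvWalk grid x y i (k + rest + 1) r (y - 1 - i) 1 0 = _
        rw [pvWalk]
        rw [if_pos (by push_cast at hk; omega)]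
        norm_num
      rw [hstep, ih rest (r + 1) (by omega) (by push_cast at hk ⊢; omega)]
      rw [List.range_succ_eq_map, List.map_cons, List.map_map]
      simp only [List.cons_append]
      congr 2
      · norm_num
      · apply List.map_congr_left; intro t _; simp [Function.comp]; congr 1; ring

theorem pvWalk_left (grid : List (List Int)) (x y i : Int)
    (h2 : 2 * i + 2 ≤ x) (h3 : 2 * i + 2 ≤ y) :
    ∀ (k rest : Nat) (c : Int), c ≤ y - 1 - i → c - k = i →
      pvWalk grid x y i (k + rest) (x - 1 - i) c 0 (-1) =
        (List.range k).map (fun (t : Nat) => pvCell grid (x - 1 - i) (c - (t : Int))) ++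
          pvWalk grid x y i rest (x - 1 - i) i 0 (-1) := by
  intro k
  induction k with
  | zero =>
      intro rest c h1 hk
      push_cast at hk
      rw [List.range_zero, List.map_nil, List.nil_append, Nat.zero_add, show c = i by omega]
  | succ k ih =>
      intro rest c h1 hk
      have hstep : pvWalk grid x y i (k + 1 + rest) (x - 1 - i) c 0 (-1) =
          pvCell grid (x - 1 - i) c :: pvWalk grid x y i (k + rest) (x - 1 - i) (c - 1) 0 (-1) := by
        rw [show k + 1 + rest = k + rest + 1 by omega]
        show pvWalk grid x y i (k + rest + 1) (x - 1 - i) c 0 (-1) = _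
        rw [pvWalk]
        rw [if_pos (by push_cast at hk; omega)]
        norm_num
        simp only [sub_eq_add_neg]
      rw [hstep, ih rest (c - 1) (by omega) (by push_cast at hk ⊢; omega)]
      rw [List.range_succ_eq_map, List.map_cons, List.map_map]
      simp only [List.cons_append]
      congr 2
      · norm_num
      · apply List.map_congr_left; intro t _; simp [Function.comp]; congr 1; ring

theorem pvWalk_up (grid : List (List Int)) (x y i : Int)
    (h2 : 2 * i + 2 ≤ x) (h3 : 2 * i + 2 ≤ y) :
    ∀ (k rest : Nat) (r : Int), r ≤ x - 1 - i → r - k = i →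
      pvWalk grid x y i (k + rest) r i (-1) 0 =
        (List.range k).map (fun (t : Nat) => pvCell grid (r - (t : Int)) i) ++
          pvWalk grid x y i rest i i (-1) 0 := by
  intro k
  induction k with
  | zero =>
      intro rest r h1 hk
      push_cast at hk
      rw [List.range_zero, List.map_nil, List.nil_append, Nat.zero_add, show r = i by omega]
  | succ k ih =>
      intro rest r h1 hk
      have hstep : pvWalk grid x y i (k + 1 + rest) r i (-1) 0 =
          pvCell grid r i :: pvWalk grid x y i (k + rest) (r - 1) i (-1) 0 := by
        rw [show k + 1 + rest = k + rest + 1 by omega]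
        show pvWalk grid x y i (k + rest + 1) r i (-1) 0 = _
        rw [pvWalk]
        rw [if_pos (by push_cast at hk; omega)]
        norm_num
        simp only [sub_eq_add_neg]
      rw [hstep, ih rest (r - 1) (by omega) (by push_cast at hk ⊢; omega)]
      rw [List.range_succ_eq_map, List.map_cons, List.map_map]
      simp only [List.cons_append]
      congr 2
      · norm_num
      · apply List.map_congr_left; intro t _; simp [Function.comp]; congr 1; ring

-- the three corner turns
theorem pvWalk_corner1 (grid : List (List Int)) (x y i : Int) (rest : Nat)
    (h2 : 2 * i + 2 ≤ x) (h3 : 2 * i + 2 ≤ y) :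
    pvWalk grid x y i (rest + 1) i (y - 1 - i) 0 1 =
      pvCell grid i (y - 1 - i) :: pvWalk grid x y i rest (i + 1) (y - 1 - i) 1 0 := by
  rw [pvWalk]
  rw [if_neg (by intro h; omega)]
  norm_num

theorem pvWalk_corner2 (grid : List (List Int)) (x y i : Int) (rest : Nat)
    (h2 : 2 * i + 2 ≤ x) (h3 : 2 * i + 2 ≤ y) :
    pvWalk grid x y i (rest + 1) (x - 1 - i) (y - 1 - i) 1 0 =
      pvCell grid (x - 1 - i) (y - 1 - i) :: pvWalk grid x y i rest (x - 1 - i) (y - 2 - i) 0 (-1) := by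
  rw [pvWalk]
  rw [if_neg (by intro h; omega)]
  norm_num
  rw [show y - 1 - i - 1 = y - 2 - i by ring]

theorem pvWalk_corner3 (grid : List (List Int)) (x y i : Int) (rest : Nat)
    (h2 : 2 * i + 2 ≤ x) (h3 : 2 * i + 2 ≤ y) :
    pvWalk grid x y i (rest + 1) (x - 1 - i) i 0 (-1) =
      pvCell grid (x - 1 - i) i :: pvWalk grid x y i rest (x - 2 - i) i (-1) 0 := by
  rw [pvWalk]
  rw [if_neg (by intro h; omega)]
  norm_num
  congr 1
  ring

-- the ring equality ------------------------------------------------------------------------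
theorem pvRing_eq (grid : List (List Int)) (x y i : Int)
    (hx : (grid.length : Int) = x) (hy : ∀ row ∈ grid, (row.length : Int) = y)
    (h0 : 0 ≤ i) (h2 : 2 * i + 2 ≤ x) (h3 : 2 * i + 2 ≤ y) :
    ((((([] : List Int) ++
        (PySem.List.pyRange i (y - i - 1) 1).map (fun j => pvCell grid i j)) ++
        (PySem.List.pyRange i (x - i - 1) 1).map (fun j => pvCell grid j (-1 - i))) ++
        (PySem.List.pyRange (y - i - 1) i (-1)).map (fun j => pvCell grid (-i - 1) j)) ++
        (PySem.List.pyRange (x - i - 1) i (-1)).map (fun j => pvCell grid j i)) =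
      pvWalk grid x y i (2 * (x - 2 * i) + 2 * (y - 2 * i) - 4).toNat i i 0 1 := by
  -- normalise A's negative row/column indices
  have hrow : ∀ j : Int, pvCell grid (-i - 1) j = pvCell grid (x - 1 - i) j := by
    intro j
    rw [pvCell_row_neg grid x (-i - 1) j hx (by omega) (by omega)]
    congr 1
    ring
  have hcol : ∀ j ∈ PySem.List.pyRange i (x - i - 1) 1,
      pvCell grid j (-1 - i) = pvCell grid j (y - 1 - i) := by
    intro j hj
    rw [PySem.List.mem_pyRange_one] at hj
    rw [pvCell_col_neg grid x y j (-1 - i) hx hy (by omega) (by omega) (by omega) (by omega)]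
    congr 1
    ring
  rw [List.map_congr_left hcol]
  simp only [List.nil_append, hrow]
  -- A's four ranges as maps over List.range
  rw [PySem.List.pyRange_one i (y - i - 1), PySem.List.pyRange_one i (x - i - 1),
      PySem.List.pyRange_neg_one (y - i - 1) i, PySem.List.pyRange_neg_one (x - i - 1) i]
  simp only [List.map_map, Function.comp_def]
  rw [show (y - i - 1 - i).toNat = (y - 2 * i - 2).toNat + 1 by omega,
      show (x - i - 1 - i).toNat = (x - 2 * i - 2).toNat + 1 by omega]
  -- peel the corner cell off A's right / bottom / left side
  have hright : (List.range ((x - 2 * i - 2).toNat + 1)).map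
        (fun k : Nat => pvCell grid (i + (k : Int)) (y - 1 - i)) =
      pvCell grid i (y - 1 - i) ::
        (List.range ((x - 2 * i - 2).toNat)).map
          (fun t : Nat => pvCell grid (i + 1 + (t : Int)) (y - 1 - i)) := by
    rw [List.range_succ_eq_map, List.map_cons, List.map_map]
    refine congrArg₂ _ (by norm_num) ?_
    apply List.map_congr_left; intro t _; simp [Function.comp]; congr 1; ring
  have hbottom : (List.range ((y - 2 * i - 2).toNat + 1)).map
        (fun k : Nat => pvCell grid (x - 1 - i) (y - i - 1 - (k : Int))) =
      pvCell grid (x - 1 - i) (y - 1 - i) ::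
        (List.range ((y - 2 * i - 2).toNat)).map
          (fun t : Nat => pvCell grid (x - 1 - i) (y - 2 - i - (t : Int))) := by
    rw [List.range_succ_eq_map, List.map_cons, List.map_map]
    refine congrArg₂ _ (by norm_num; congr 1; ring) ?_
    apply List.map_congr_left; intro t _; simp [Function.comp]; congr 1; ring
  have hleft : (List.range ((x - 2 * i - 2).toNat + 1)).map
        (fun k : Nat => pvCell grid (x - i - 1 - (k : Int)) i) =
      pvCell grid (x - 1 - i) i ::
        (List.range ((x - 2 * i - 2).toNat)).map
          (fun t : Nat => pvCell grid (x - 2 - i - (t : Int)) i) := by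
    rw [List.range_succ_eq_map, List.map_cons, List.map_map]
    refine congrArg₂ _ (by norm_num; congr 1; ring) ?_
    apply List.map_congr_left; intro t _; simp [Function.comp]; congr 1; ring
  -- unroll the walk: straight segment, corner, straight, corner, straight, corner, straight
  rw [show (2 * (x - 2 * i) + 2 * (y - 2 * i) - 4).toNat =
        ((y - 2 * i - 2).toNat + 1) +
          (((x - 2 * i - 2).toNat +
            (((y - 2 * i - 2).toNat + (((x - 2 * i - 2).toNat + 0) + 1)) + 1)) + 1) by omega]
  rw [pvWalk_right grid x y i h2 h3 ((y - 2 * i - 2).toNat + 1)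
        (((x - 2 * i - 2).toNat +
          (((y - 2 * i - 2).toNat + (((x - 2 * i - 2).toNat + 0) + 1)) + 1)) + 1)
        i le_rfl (by omega)]
  rw [pvWalk_corner1 grid x y i
        ((x - 2 * i - 2).toNat +
          (((y - 2 * i - 2).toNat + (((x - 2 * i - 2).toNat + 0) + 1)) + 1)) h2 h3]
  rw [pvWalk_down grid x y i h2 h3 ((x - 2 * i - 2).toNat)
        (((y - 2 * i - 2).toNat + (((x - 2 * i - 2).toNat + 0) + 1)) + 1)
        (i + 1) (by omega) (by omega)]
  rw [pvWalk_corner2 grid x y i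
        ((y - 2 * i - 2).toNat + (((x - 2 * i - 2).toNat + 0) + 1)) h2 h3]
  rw [pvWalk_left grid x y i h2 h3 ((y - 2 * i - 2).toNat) (((x - 2 * i - 2).toNat + 0) + 1)
        (y - 2 - i) (by omega) (by omega)]
  rw [pvWalk_corner3 grid x y i ((x - 2 * i - 2).toNat + 0) h2 h3]
  rw [pvWalk_up grid x y i h2 h3 ((x - 2 * i - 2).toNat) 0 (x - 2 - i) (by omega) (by omega)]
  rw [hright, hbottom, hleft]
  simp only [pvWalk, List.append_nil, List.append_assoc, List.cons_append]

-- the outer loop ---------------------------------------------------------------------------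
theorem desemble_eq_map (x y : Int) (grid : List (List Int)) :
    desemble x y grid =
      (PySem.List.pyRange 0 (PySem.Int.floordiv (min x y) 2) 1).map
        (fun i =>
          ((((([] : List Int) ++
            (PySem.List.pyRange i (y - i - 1) 1).map (fun j => pvCell grid i j)) ++
            (PySem.List.pyRange i (x - i - 1) 1).map (fun j => pvCell grid j (-1 - i))) ++
            (PySem.List.pyRange (y - i - 1) i (-1)).map (fun j => pvCell grid (-i - 1) j)) ++
            (PySem.List.pyRange (x - i - 1) i (-1)).map (fun j => pvCell grid j i))) := by
  simp only [desemble, PySem.List.foldl_append_singleton_eq_map, List.nil_append]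

theorem desemble_alt_eq_map (x y : Int) (grid : List (List Int)) :
    desemble_alt x y grid =
      (PySem.List.pyRange 0 (PySem.Int.floordiv (min x y) 2) 1).map
        (fun i => pvWalk grid x y i (2 * (x - 2 * i) + 2 * (y - 2 * i) - 4).toNat i i 0 1) := by
  simp only [desemble_alt, PySem.List.foldl_append_singleton_eq_map, List.nil_append]

-- ===== VERDICT (by name: the statement is the Claim_ definition above) =====
theorem desemble_spec : Claim_equal_desemble := by
  intro x y grid _ hpre
  unfold Spec_desemble
  rw [desemble_eq_map, desemble_alt_eq_map]
  by_cases hsmall : PySem.Int.floordiv (min x y) 2 ≤ 0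
  · rw [PySem.List.pyRange_one_eq_nil hsmall, List.map_nil, List.map_nil]
  · push Not at hsmall
    have hmin : 2 ≤ min x y := by
      by_contra h
      push Not at h
      rw [PySem.Int.floordiv_eq_ediv_of_pos (by omega)] at hsmall
      omega
    rcases hpre with h | ⟨hx, hy⟩
    · omega
    · apply List.map_congr_left
      intro i hi
      rw [PySem.List.mem_pyRange_one] at hi
      have hib : 0 ≤ i ∧ i < PySem.Int.floordiv (min x y) 2 := hi
      rw [PySem.Int.floordiv_eq_ediv_of_pos (by omega)] at hib
      have h2 : 2 * i + 2 ≤ x := by omega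
      have h3 : 2 * i + 2 ≤ y := by omega
      exact pvRing_eq grid x y i hx hy hib.1 h2 h3
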